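-- pv_equiv track=rewrite | github.com/opengeogroep/AERIUS-QGIS-plugins | ImaerPlugin/tasks/extract_gml_from_pdf.py | get_gml_strings
-- ===== SOURCE A (Python) =====
-- def get_gml_strings(pdf_line):
--     result = []
--     start_string = '<?xml '
--     end_string = '</imaer:FeatureCollectionCalculator>'
--
--     stop = False
--     start_char = 0
--
--     while not stop:
--         '''Finds the gml part in the pdf line'''
--         first_char = pdf_line.find(start_string, start_char)
--         if first_char < 0:
--             break
--         last_char = pdf_line.find(end_string, first_char)
--         if last_char < 0:
--             break
--         last_char += len(end_string)  # add the length of the search string to jump to the end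
--         result.append(pdf_line[first_char:last_char])
--         start_char = last_char
--
--     return result
-- ===== SOURCE B (Python) =====
-- def get_gml_strings(pdf_line):
--     # Single left-to-right character-level state machine: no str.find calls,
--     # no backtracking; at each index we either look for the start marker
--     # (capturing < 0) or for the end marker (capturing = start index of the
--     # current block).
--     result = []
--     start_string = '<?xml '
--     end_string = '</imaer:FeatureCollectionCalculator>'
--     n = len(pdf_line)
--     i = 0
--     capturing = -1
--     while i < n:
--         if capturing < 0:
--             if pdf_line.startswith(start_string, i):
--                 capturing = i
--                 i += len(start_string)
--             else:
--                 i += 1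
--         else:
--             if pdf_line.startswith(end_string, i):
--                 result.append(pdf_line[capturing:i + len(end_string)])
--                 capturing = -1
--                 i += len(end_string)
--             else:
--                 i += 1
--     return result
-- ===== Notes on version B (the rewrite author's own statement) =====
-- stated objective: alternative
-- what changed: Replaced A's repeated str.find calls with a single left-to-right character-level state machine: one index walks the string once, toggling between 'looking for the start marker' and 'looking for the end marker' via startswith at the current position; no find/index search calls remain.
import Mathlib
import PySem

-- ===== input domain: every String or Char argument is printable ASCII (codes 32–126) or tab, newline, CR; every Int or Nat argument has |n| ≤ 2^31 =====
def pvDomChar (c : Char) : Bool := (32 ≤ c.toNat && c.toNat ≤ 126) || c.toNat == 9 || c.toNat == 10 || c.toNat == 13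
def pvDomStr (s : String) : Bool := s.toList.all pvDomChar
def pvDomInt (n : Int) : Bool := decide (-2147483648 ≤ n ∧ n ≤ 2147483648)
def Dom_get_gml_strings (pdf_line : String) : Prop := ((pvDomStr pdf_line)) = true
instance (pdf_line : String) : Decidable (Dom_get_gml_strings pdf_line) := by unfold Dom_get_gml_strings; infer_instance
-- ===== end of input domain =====

-- B replaces A's repeated str.find search loop by a single left-to-right character-level
-- state machine (startswith at the running index, no find calls); return values proved equal.


-- ===== PORT A =====
-- the two pattern literals of the Python source
def pvStartStr : List Char := "<?xml ".toList
def pvEndStr : List Char := "</imaer:FeatureCollectionCalculator>".toList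

-- A's while-loop; start_char is the running index, fuel = |s|+1 never runs out
-- (start_char strictly grows by ≥ len(end_string) and stays ≤ |s|).
def pvALoop (s : List Char) : Nat → Nat → List String → List String
  | 0, _, result => result
  | fuel+1, start_char, result =>
    let first_char := PySem.Chars.findFrom s pvStartStr (start_char : Int)
    if first_char < 0 then result
    else
      let last_char := PySem.Chars.findFrom s pvEndStr first_char
      if last_char < 0 then result
      else
        let last_char := last_char + (pvEndStr.length : Int)
        pvALoop s fuel last_char.toNat
          (result ++ [String.ofList (PySem.Chars.slice s (some first_char) (some last_char))])

def get_gml_strings (pdf_line : String) : List String :=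
  pvALoop pdf_line.toList (pdf_line.toList.length + 1) 0 []

-- ===== PORT B =====
-- B's single while-loop: the index i walks the string once; capturing < 0 means
-- "looking for the start marker", otherwise capturing is the start index of the
-- current block and we look for the end marker. startswith(pat, i) is ported as
-- startswith on s.drop i (exact for 0 ≤ i). i strictly increases: WF on length - i.
def pvBLoop (s : List Char) (i : Nat) (capturing : Int) (result : List String) : List String :=
  if h : i < s.length then
    if capturing < 0 then
      if PySem.Chars.startswith (s.drop i) pvStartStr then
        pvBLoop s (i + pvStartStr.length) (i : Int) result
      else
        pvBLoop s (i + 1) capturing result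
    else
      if PySem.Chars.startswith (s.drop i) pvEndStr then
        pvBLoop s (i + pvEndStr.length) (-1)
          (result ++ [String.ofList (PySem.Chars.slice s (some capturing) (some ((i : Int) + (pvEndStr.length : Int))))])
      else
        pvBLoop s (i + 1) capturing result
  else result
termination_by s.length - i
decreasing_by
  · have h6 : pvStartStr.length = 6 := by decide
    omega
  · omega
  · have h36 : pvEndStr.length = 36 := by decide
    omega
  · omega

def get_gml_strings_alt (pdf_line : String) : List String :=
  pvBLoop pdf_line.toList 0 (-1) []

-- ===== PRECONDITION & SPEC =====
def Spec_get_gml_strings (pdf_line : String) (out : List String) : Prop := out = get_gml_strings_alt pdf_line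
instance (pdf_line : String) (out : List String) : Decidable (Spec_get_gml_strings pdf_line out) := by unfold Spec_get_gml_strings; infer_instance

-- ===== CLAIM (what is proved, stated in full; the proofs are below) =====
def Claim_equal_get_gml_strings : Prop := ∀ (pdf_line : String), Dom_get_gml_strings pdf_line → Spec_get_gml_strings pdf_line (get_gml_strings pdf_line)

-- ===== LEMMAS AND PROOFS =====

-- the end pattern never starts inside an occurrence of the start pattern
lemma pv_mismatch (t : Nat) (ht : t < 6) (v : List Char) :
    ¬ pvEndStr <+: (pvStartStr.drop t ++ v) := by
  interval_cases t <;>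
    simp [pvStartStr, pvEndStr, List.cons_prefix_cons]

-- characterisation of find as the least prefix position (wrapper of findFrom_natCast_spec)
lemma pv_find_spec (l sub : List Char) (h : PySem.Chars.find l sub ≠ -1) :
    sub <+: l.drop (PySem.Chars.find l sub).toNat ∧
    ∀ q : Nat, q < (PySem.Chars.find l sub).toNat → ¬ sub <+: l.drop q := by
  have h0 : (0:Nat) ≤ l.length := Nat.zero_le _
  have := PySem.Chars.findFrom_natCast_spec l sub 0 h0 (by simpa [PySem.Chars.findFrom_zero] using h)
  rw [show ((0:Nat):Int) = 0 from rfl, PySem.Chars.findFrom_zero] at this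
  exact ⟨this.2.1, fun q hq => this.2.2 q (Nat.zero_le _) hq⟩

lemma pv_find_unique (l sub : List Char) (p : Nat)
    (hp : sub <+: l.drop p) (hmin : ∀ q : Nat, q < p → ¬ sub <+: l.drop q) :
    PySem.Chars.find l sub = p := by
  have hinf : sub <:+: l := hp.isInfix.trans (List.drop_suffix p l).isInfix
  have hne : PySem.Chars.find l sub ≠ -1 := by
    rw [Ne, PySem.Chars.find_eq_neg_one_iff]; exact fun h => h hinf
  obtain ⟨hpre, hm⟩ := pv_find_spec l sub hne
  have hge : -1 ≤ PySem.Chars.find l sub := PySem.Chars.neg_one_le_find l sub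
  have h0 : 0 ≤ PySem.Chars.find l sub := by omega
  have heq : (PySem.Chars.find l sub).toNat = p := by
    rcases Nat.lt_trichotomy (PySem.Chars.find l sub).toNat p with h | h | h
    · exact absurd hpre (hmin _ h)
    · exact h
    · exact absurd hp (hm _ h)
  omega

-- splitting a successful prefix match: l.drop n = sub ++ l.drop (n + |sub|), and the bound
lemma pv_prefix_drop (l sub : List Char) (n : Nat) (hsub : sub ≠ [])
    (h : sub <+: l.drop n) :
    l.drop n = sub ++ l.drop (n + sub.length) ∧ n + sub.length ≤ l.length := by
  obtain ⟨w, hw⟩ := h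
  have hlen : (l.drop n).length = l.length - n := List.length_drop ..
  have hlen2 : sub.length + w.length = l.length - n := by
    rw [← hlen, ← hw]; simp
  have hsl : 0 < sub.length := List.length_pos_iff.mpr hsub
  have hb : n + sub.length ≤ l.length := by omega
  refine ⟨?_, hb⟩
  have : l.drop (n + sub.length) = (l.drop n).drop sub.length := by
    rw [List.drop_drop]
  rw [this, ← hw, List.drop_left]

-- shifting find over a leading start-pattern occurrence
lemma pv_find_shift (u : List Char) :
    PySem.Chars.find (pvStartStr ++ u) pvEndStr =
      if PySem.Chars.find u pvEndStr = -1 then -1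
      else 6 + PySem.Chars.find u pvEndStr := by
  have hSlen : pvStartStr.length = 6 := by decide
  by_cases h : PySem.Chars.find u pvEndStr = -1
  · rw [if_pos h]
    rw [PySem.Chars.find_eq_neg_one_iff]
    intro hinf
    have := (PySem.Chars.exists_prefix_drop_iff_isIn pvEndStr (pvStartStr ++ u)).2
        ((PySem.Chars.isIn_iff_infix _ _).2 hinf)
    obtain ⟨j, hj⟩ := this
    by_cases hj6 : j < 6
    · have : (pvStartStr ++ u).drop j = pvStartStr.drop j ++ u := by
        rw [List.drop_append]
        have : j - pvStartStr.length = 0 := by omega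
        rw [this, List.drop_zero]
      rw [this] at hj
      exact pv_mismatch j hj6 u hj
    · have : (pvStartStr ++ u).drop j = u.drop (j - 6) := by
        rw [List.drop_append]
        have h1 : pvStartStr.drop j = [] := by
          apply List.drop_eq_nil_of_le; omega
        rw [h1, hSlen]; simp
      rw [this] at hj
      have : pvEndStr <:+: u := hj.isInfix.trans (List.drop_suffix _ u).isInfix
      exact (PySem.Chars.find_eq_neg_one_iff _ _).1 h this
  · rw [if_neg h]
    obtain ⟨hpre, hmin⟩ := pv_find_spec u pvEndStr h
    have h0 : 0 ≤ PySem.Chars.find u pvEndStr := by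
      have := PySem.Chars.neg_one_le_find u pvEndStr; omega
    set p := (PySem.Chars.find u pvEndStr).toNat with hp
    have hfind : PySem.Chars.find (pvStartStr ++ u) pvEndStr = (6 + p : Nat) := by
      apply pv_find_unique
      · have : (pvStartStr ++ u).drop (6 + p) = u.drop p := by
          rw [List.drop_append]
          have h1 : pvStartStr.drop (6 + p) = [] := by
            apply List.drop_eq_nil_of_le; omega
          rw [h1, hSlen]; simp
        rw [this]; exact hpre
      · intro q hq
        by_cases hq6 : q < 6
        · have : (pvStartStr ++ u).drop q = pvStartStr.drop q ++ u := by
            rw [List.drop_append]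
            have : q - pvStartStr.length = 0 := by omega
            rw [this, List.drop_zero]
          rw [this]; exact pv_mismatch q hq6 u
        · have : (pvStartStr ++ u).drop q = u.drop (q - 6) := by
            rw [List.drop_append]
            have h1 : pvStartStr.drop q = [] := by
              apply List.drop_eq_nil_of_le; omega
            rw [h1, hSlen]; simp
          rw [this]; exact hmin (q - 6) (by omega)
    rw [hfind]; push_cast; omega

-- a nonempty prefix of s.drop p forces p < s.length
lemma pv_lt_of_prefix (s sub : List Char) (p : Nat) (hsub : sub ≠ [])
    (h : sub <+: s.drop p) : p < s.length := by
  by_contra hge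
  rw [List.drop_eq_nil_of_le (by omega)] at h
  exact hsub (List.prefix_nil.mp h)

-- B in search mode with no start-marker occurrence ahead: falls off the end
lemma pvB_scan_none (s : List Char) : ∀ (d i : Nat) (c : Int) (acc : List String),
    s.length - i ≤ d → c < 0 →
    (∀ q : Nat, i ≤ q → ¬ pvStartStr <+: s.drop q) →
    pvBLoop s i c acc = acc := by
  intro d
  induction d with
  | zero =>
    intro i c acc hd _ _
    rw [pvBLoop]; rw [dif_neg (by omega)]
  | succ d ih =>
    intro i c acc hd hc hno
    rw [pvBLoop]
    by_cases hi : i < s.length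
    · rw [dif_pos hi, if_pos hc]
      rw [if_neg (by
        simp only [PySem.Chars.startswith_iff]
        exact hno i le_rfl)]
      exact ih (i + 1) c acc (by omega) hc (fun q hq => hno q (by omega))
    · rw [dif_neg hi]

-- B in search mode scans up to the first start-marker occurrence and enters capture
lemma pvB_search (s : List Char) : ∀ (d i : Nat) (c : Int) (acc : List String) (p : Nat),
    c < 0 → i ≤ p → p - i ≤ d →
    (∀ q : Nat, i ≤ q → q < p → ¬ pvStartStr <+: s.drop q) →
    pvStartStr <+: s.drop p →
    pvBLoop s i c acc = pvBLoop s (p + pvStartStr.length) (p : Int) acc := by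
  intro d
  induction d with
  | zero =>
    intro i c acc p hc hip hd _ hp
    have hip' : i = p := by omega
    subst hip'
    have hlt : i < s.length := pv_lt_of_prefix s pvStartStr i (by decide) hp
    rw [pvBLoop, dif_pos hlt, if_pos hc,
      if_pos (by simp only [PySem.Chars.startswith_iff]; exact hp)]
  | succ d ih =>
    intro i c acc p hc hip hd hmin hp
    by_cases hip' : i = p
    · subst hip'
      have hlt : i < s.length := pv_lt_of_prefix s pvStartStr i (by decide) hp
      rw [pvBLoop, dif_pos hlt, if_pos hc,
        if_pos (by simp only [PySem.Chars.startswith_iff]; exact hp)]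
    · have hlt : i < s.length := by
        have := pv_lt_of_prefix s pvStartStr p (by decide) hp
        omega
      rw [pvBLoop, dif_pos hlt, if_pos hc]
      rw [if_neg (by
        simp only [PySem.Chars.startswith_iff]
        exact hmin i le_rfl (by omega))]
      exact ih (i + 1) c acc p hc (by omega) (by omega)
        (fun q hq => hmin q (by omega)) hp

-- B in capture mode with no end-marker occurrence ahead: falls off the end
lemma pvB_cap_none (s : List Char) : ∀ (d i : Nat) (c : Int) (acc : List String),
    s.length - i ≤ d → ¬ c < 0 →
    (∀ q : Nat, i ≤ q → ¬ pvEndStr <+: s.drop q) →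
    pvBLoop s i c acc = acc := by
  intro d
  induction d with
  | zero =>
    intro i c acc hd _ _
    rw [pvBLoop]; rw [dif_neg (by omega)]
  | succ d ih =>
    intro i c acc hd hc hno
    rw [pvBLoop]
    by_cases hi : i < s.length
    · rw [dif_pos hi, if_neg hc]
      rw [if_neg (by
        simp only [PySem.Chars.startswith_iff]
        exact hno i le_rfl)]
      exact ih (i + 1) c acc (by omega) hc (fun q hq => hno q (by omega))
    · rw [dif_neg hi]

-- B in capture mode scans up to the first end-marker occurrence, emits, resets
lemma pvB_cap (s : List Char) : ∀ (d i : Nat) (c : Int) (acc : List String) (m : Nat),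
    ¬ c < 0 → i ≤ m → m - i ≤ d →
    (∀ q : Nat, i ≤ q → q < m → ¬ pvEndStr <+: s.drop q) →
    pvEndStr <+: s.drop m →
    pvBLoop s i c acc = pvBLoop s (m + pvEndStr.length) (-1)
      (acc ++ [String.ofList (PySem.Chars.slice s (some c) (some ((m : Int) + (pvEndStr.length : Int))))]) := by
  intro d
  induction d with
  | zero =>
    intro i c acc m hc him hd _ hm
    have him' : i = m := by omega
    subst him'
    have hlt : i < s.length := pv_lt_of_prefix s pvEndStr i (by decide) hm
    rw [pvBLoop, dif_pos hlt, if_neg hc,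
      if_pos (by simp only [PySem.Chars.startswith_iff]; exact hm)]
  | succ d ih =>
    intro i c acc m hc him hd hmin hm
    by_cases him' : i = m
    · subst him'
      have hlt : i < s.length := pv_lt_of_prefix s pvEndStr i (by decide) hm
      rw [pvBLoop, dif_pos hlt, if_neg hc,
        if_pos (by simp only [PySem.Chars.startswith_iff]; exact hm)]
    · have hlt : i < s.length := by
        have := pv_lt_of_prefix s pvEndStr m (by decide) hm
        omega
      rw [pvBLoop, dif_pos hlt, if_neg hc]
      rw [if_neg (by
        simp only [PySem.Chars.startswith_iff]
        exact hmin i le_rfl (by omega))]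
      exact ih (i + 1) c acc m hc (by omega) (by omega)
        (fun q hq => hmin q (by omega)) hm

-- the two loops agree: B in search mode at index k mirrors A's start_char = k
-- (each A iteration advances start_char by at least 42, so fuel ≥ |s|-k+1 suffices)
lemma pv_loop_eq (fuel : Nat) : ∀ (s : List Char) (k : Nat) (acc : List String),
    k ≤ s.length → s.length - k + 1 ≤ fuel →
    pvALoop s fuel k acc = pvBLoop s k (-1) acc := by
  induction fuel with
  | zero => intro s k acc hk hf; omega
  | succ fuel ih =>
    intro s k acc hk hf
    rw [pvALoop]
    rw [PySem.Chars.findFrom_natCast s pvStartStr k hk]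
    by_cases hI : PySem.Chars.find (s.drop k) pvStartStr = -1
    · have hno : ∀ q : Nat, k ≤ q → ¬ pvStartStr <+: s.drop q := by
        intro q hq hpre
        have hdq : s.drop q = (s.drop k).drop (q - k) := by
          rw [List.drop_drop]; congr 1; omega
        rw [hdq] at hpre
        exact (PySem.Chars.find_eq_neg_one_iff _ _).1 hI
          (hpre.isInfix.trans (List.drop_suffix _ _).isInfix)
      simp only [hI, if_pos]
      rw [if_pos (by norm_num)]
      exact (pvB_scan_none s s.length k (-1) acc (by omega) (by norm_num) hno).symm
    · rw [if_neg hI]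
      have hIge : 0 ≤ PySem.Chars.find (s.drop k) pvStartStr := by
        have := PySem.Chars.neg_one_le_find (s.drop k) pvStartStr; omega
      rw [if_neg (by omega : ¬ ((k : Int) + PySem.Chars.find (s.drop k) pvStartStr < 0))]
      obtain ⟨hpreS, hminS⟩ := pv_find_spec (s.drop k) pvStartStr hI
      set iN := (PySem.Chars.find (s.drop k) pvStartStr).toNat with hiN
      have hfle : PySem.Chars.find (s.drop k) pvStartStr ≤ ((s.drop k).length : Int) :=
        PySem.Chars.find_le_length ..
      have hdl : (s.drop k).length = s.length - k := List.length_drop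
      have hkin : k + iN ≤ s.length := by omega
      -- the first start-marker occurrence, as a position in s
      have hpreS' : pvStartStr <+: s.drop (k + iN) := by
        have hE : s.drop (k + iN) = (s.drop k).drop iN := by
          rw [List.drop_drop, Nat.add_comm]
        rw [hE]; exact hpreS
      have hminS' : ∀ q : Nat, k ≤ q → q < k + iN → ¬ pvStartStr <+: s.drop q := by
        intro q hq1 hq2 hpre
        have hdq : s.drop q = (s.drop k).drop (q - k) := by
          rw [List.drop_drop]; congr 1; omega
        rw [hdq] at hpre
        exact hminS (q - k) (by omega) hpre
      have e1 : (k : Int) + PySem.Chars.find (s.drop k) pvStartStr = ((k + iN : Nat) : Int) := by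
        push_cast; omega
      rw [e1, PySem.Chars.findFrom_natCast s pvEndStr (k + iN) hkin]
      obtain ⟨hsplitS, hboundS⟩ := pv_prefix_drop s pvStartStr (k + iN) (by decide) hpreS'
      have hSlen : pvStartStr.length = 6 := by decide
      rw [hSlen] at hsplitS hboundS
      have e2 : s.drop (k + iN) = pvStartStr ++ s.drop (k + iN + 6) := hsplitS
      rw [show PySem.Chars.find (s.drop (k + iN)) pvEndStr
            = PySem.Chars.find (pvStartStr ++ s.drop (k + iN + 6)) pvEndStr from by rw [← e2]]
      rw [pv_find_shift]
      -- B reaches the capture state at k + iN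
      rw [pvB_search s (k + iN - k) k (-1) acc (k + iN) (by norm_num) (by omega) (by omega)
        hminS' hpreS', hSlen]
      by_cases hJ : PySem.Chars.find (s.drop (k + iN + 6)) pvEndStr = -1
      · -- no end marker ahead: A breaks, B scans to the end of the string
        have hno : ∀ q : Nat, k + iN + 6 ≤ q → ¬ pvEndStr <+: s.drop q := by
          intro q hq hpre
          have hdq : s.drop q = (s.drop (k + iN + 6)).drop (q - (k + iN + 6)) := by
            rw [List.drop_drop]; congr 1; omega
          rw [hdq] at hpre
          exact (PySem.Chars.find_eq_neg_one_iff _ _).1 hJ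
            (hpre.isInfix.trans (List.drop_suffix _ _).isInfix)
        simp only [hJ, if_pos]
        rw [if_pos (by norm_num)]
        exact (pvB_cap_none s s.length (k + iN + 6) ((k + iN : Nat) : Int) acc (by omega)
          (by push_cast; omega) hno).symm
      · have hJge : 0 ≤ PySem.Chars.find (s.drop (k + iN + 6)) pvEndStr := by
          have := PySem.Chars.neg_one_le_find (s.drop (k + iN + 6)) pvEndStr; omega
        rw [if_neg hJ]
        rw [if_neg (by omega :
          ¬ ((6 : Int) + PySem.Chars.find (s.drop (k + iN + 6)) pvEndStr = -1))]
        rw [if_neg (by push_cast; omega :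
          ¬ (((k + iN : Nat) : Int) + (6 + PySem.Chars.find (s.drop (k + iN + 6)) pvEndStr) < 0))]
        obtain ⟨hpreE, hminE⟩ := pv_find_spec (s.drop (k + iN + 6)) pvEndStr hJ
        set jN := (PySem.Chars.find (s.drop (k + iN + 6)) pvEndStr).toNat with hjN
        have hfleE : PySem.Chars.find (s.drop (k + iN + 6)) pvEndStr
            ≤ ((s.drop (k + iN + 6)).length : Int) := PySem.Chars.find_le_length ..
        have hdlE : (s.drop (k + iN + 6)).length = s.length - (k + iN + 6) := List.length_drop
        have hpreE' : pvEndStr <+: s.drop (k + iN + 6 + jN) := by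
          have : s.drop (k + iN + 6 + jN) = (s.drop (k + iN + 6)).drop jN := by
            rw [List.drop_drop, Nat.add_comm]
          rw [this]; exact hpreE
        have hminE' : ∀ q : Nat, k + iN + 6 ≤ q → q < k + iN + 6 + jN →
            ¬ pvEndStr <+: s.drop q := by
          intro q hq1 hq2 hpre
          have hdq : s.drop q = (s.drop (k + iN + 6)).drop (q - (k + iN + 6)) := by
            rw [List.drop_drop]; congr 1; omega
          rw [hdq] at hpre
          exact hminE (q - (k + iN + 6)) (by omega) hpre
        obtain ⟨_, hboundE⟩ := pv_prefix_drop s pvEndStr (k + iN + 6 + jN) (by decide) hpreE'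
        have hElen : pvEndStr.length = 36 := by decide
        rw [hElen] at hboundE
        -- B emits the same slice and resets
        rw [pvB_cap s jN (k + iN + 6) ((k + iN : Nat) : Int) acc (k + iN + 6 + jN)
          (by push_cast; omega) (by omega) (by omega) hminE' hpreE']
        -- the slice bounds of A and B coincide
        have eargs : ((k + iN : Nat) : Int)
              + (6 + PySem.Chars.find (s.drop (k + iN + 6)) pvEndStr)
              + (pvEndStr.length : Int)
            = ((k + iN + 6 + jN : Nat) : Int) + (pvEndStr.length : Int) := by
          push_cast; omega
        rw [eargs]
        have etoNat : (((k + iN + 6 + jN : Nat) : Int) + (pvEndStr.length : Int)).toNat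
            = k + iN + 6 + jN + pvEndStr.length := by
          rw [hElen]; push_cast; omega
        simp only [etoNat]
        exact ih s (k + iN + 6 + jN + pvEndStr.length) _
          (by rw [hElen]; omega) (by rw [hElen]; omega)

lemma pv_main (pdf_line : String) :
    get_gml_strings pdf_line = get_gml_strings_alt pdf_line := by
  unfold get_gml_strings get_gml_strings_alt
  exact pv_loop_eq (pdf_line.toList.length + 1) pdf_line.toList 0 [] (Nat.zero_le _) (by omega)

-- ===== VERDICT (by name: the statement is the Claim_ definition above) =====
theorem get_gml_strings_spec : Claim_equal_get_gml_strings := by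
  intro pdf_line _
  unfold Spec_get_gml_strings
  exact pv_main pdf_line
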